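-- pv_equiv track=rewrite | github.com/adusa1019/atcoder | ABC101/A.py | solve
-- ===== SOURCE A (Python) =====
-- def solve(string):
--     ans = 0
--     for s in string:
--         if s == "+":
--             ans += 1
--         else:
--             ans -= 1
--     return str(ans)
-- ===== SOURCE B (Python) =====
-- def solve(string):
--     return str(2 * string.count("+") - len(string))
-- ===== Notes on version B (the rewrite author's own statement) =====
-- stated objective: simpler
-- what changed: Replaces the per-character accumulation loop with a closed-form arithmetic expression over one library count of plus signs and the string length, since every other character contributes minus one.
import Mathlib
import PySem

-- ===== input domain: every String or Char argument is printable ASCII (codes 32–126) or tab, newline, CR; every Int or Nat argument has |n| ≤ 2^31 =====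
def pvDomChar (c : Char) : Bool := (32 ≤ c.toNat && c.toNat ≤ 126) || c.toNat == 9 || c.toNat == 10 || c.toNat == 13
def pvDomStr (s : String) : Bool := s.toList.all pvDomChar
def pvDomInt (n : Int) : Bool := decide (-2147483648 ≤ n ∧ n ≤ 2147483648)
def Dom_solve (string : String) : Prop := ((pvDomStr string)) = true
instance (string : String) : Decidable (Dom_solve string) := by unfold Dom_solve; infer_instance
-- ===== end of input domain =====

-- B replaces A's per-character +1/-1 accumulation loop with the closed form 2*count('+') - len (simpler).

-- ===== PORT A =====
def solve (string : String) : String :=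
  let ans : Int := string.toList.foldl (fun ans s => if s == '+' then ans + 1 else ans - 1) 0
  PySem.Int.toStr ans

-- ===== PORT B =====
def solve_alt (string : String) : String :=
  PySem.Int.toStr (2 * (PySem.Str.count string "+" : Int) - (PySem.Str.len string : Int))

-- ===== PRECONDITION & SPEC =====
def Spec_solve (string : String) (out : String) : Prop := out = solve_alt string
instance (string : String) (out : String) : Decidable (Spec_solve string out) := by unfold Spec_solve; infer_instance

-- ===== CLAIM (what is proved, stated in full; the proofs are below) =====
def Claim_equal_solve : Prop := ∀ (string : String), Dom_solve string → Spec_solve string (solve string)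

-- ===== LEMMAS AND PROOFS =====

-- Python's s.count("+") with a one-character needle is the list count of that character.
lemma count_go_singleton (c : Char) (l : List Char) (acc fuel : Nat) (h : l.length ≤ fuel) :
    PySem.Chars.count.go [c] fuel l acc = acc + l.count c := by
  induction l generalizing acc fuel with
  | nil => cases fuel <;> simp [PySem.Chars.count.go]
  | cons a t ih =>
    cases fuel with
    | zero => simp at h
    | succ n =>
      simp only [List.length_cons, Nat.succ_le_succ_iff] at h
      by_cases hc : c = a
      · subst hc
        simp [PySem.Chars.count.go, List.isPrefixOf, ih (acc + 1) n h]
        omega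
      · simp [PySem.Chars.count.go, List.isPrefixOf, hc, ih acc n h, List.count_cons]
        exact fun hh => hc hh.symm

lemma count_singleton (l : List Char) (c : Char) :
    PySem.Chars.count l [c] = l.count c := by
  simp [PySem.Chars.count, count_go_singleton c l 0 l.length (le_refl _)]

-- A's loop computed from any accumulator: acc + 2*count('+') - length.
lemma foldl_pm (l : List Char) (acc : Int) :
    l.foldl (fun ans s => if s == '+' then ans + 1 else ans - 1) acc
      = acc + 2 * (l.count '+' : Int) - (l.length : Int) := by
  induction l generalizing acc with
  | nil => simp
  | cons a t ih =>
    rw [List.foldl_cons, ih]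
    by_cases h : a = '+'
    · subst h
      simp
      ring
    · simp [h]
      ring

-- ===== VERDICT (by name: the statement is the Claim_ definition above) =====
theorem solve_spec : Claim_equal_solve := by
  intro s _
  unfold Spec_solve solve solve_alt
  rw [foldl_pm, PySem.Str.count_eq, show ("+".toList) = ['+'] from rfl, count_singleton]
  simp [pysem]
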